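-- pv_equiv track=rewrite | github.com/Mohammed2372/DSP-repo | DPS/temp/DSP.py | upSampling
-- ===== SOURCE A (Python) =====
-- def upSampling(data, factor):
--     zeros_num = factor - 1
--     result = []
--     for i in range(len(data)):
--         result.append(data[i])
--         if i != len(data) - 1:
--             for j in range(zeros_num):
--                 result.append(0)
--     return result
-- ===== SOURCE B (Python) =====
-- def upSampling(data, factor):
--     if factor <= 0:
--         return list(data)
--     if not data:
--         return []
--     result = [0] * ((len(data) - 1) * factor + 1)
--     for i, x in enumerate(data):
--         result[i * factor] = x
--     return result
-- ===== Notes on version B (the rewrite author's own statement) =====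
-- stated objective: alternative
-- what changed: B preallocates a zero-filled list of the exact output length and writes each sample at index i*factor in one pass, replacing A's nested loops that append each sample and then its trailing zeros one element at a time.
import Mathlib
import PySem

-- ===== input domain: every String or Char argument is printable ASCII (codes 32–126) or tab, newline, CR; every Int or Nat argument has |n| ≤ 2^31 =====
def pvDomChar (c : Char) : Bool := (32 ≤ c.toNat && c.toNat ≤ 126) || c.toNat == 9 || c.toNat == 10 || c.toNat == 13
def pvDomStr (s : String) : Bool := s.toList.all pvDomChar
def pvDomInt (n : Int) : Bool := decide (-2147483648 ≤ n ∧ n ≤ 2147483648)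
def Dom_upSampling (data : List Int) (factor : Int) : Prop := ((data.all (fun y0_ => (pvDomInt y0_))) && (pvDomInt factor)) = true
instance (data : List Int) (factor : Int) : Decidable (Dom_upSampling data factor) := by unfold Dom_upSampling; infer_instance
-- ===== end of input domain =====

-- B preallocates the zero-filled output and writes each sample at its stride position in one
-- pass, instead of A's nested append loops; objective: alternative decomposition.

-- ===== PORT A =====
def upSampling (data : List Int) (factor : Int) : List Int :=
  let zeros_num := factor - 1
  (PySem.List.pyRange 0 data.length 1).foldl
    (fun result i =>
      let result := result ++ [PySem.List.pyGetD data i 0]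
      if i ≠ (data.length : Int) - 1 then
        (PySem.List.pyRange 0 zeros_num 1).foldl (fun r _ => r ++ [(0 : Int)]) result
      else result)
    []

-- ===== PORT B =====
def upSampling_alt (data : List Int) (factor : Int) : List Int :=
  if factor ≤ 0 then data
  else if data.isEmpty then []
  else
    (PySem.List.enumerate data).foldl
      (fun r p => PySem.List.pySetD r (p.1 * factor) p.2)
      (List.replicate ((data.length - 1) * factor.toNat + 1) 0)

-- ===== PRECONDITION & SPEC =====
def Spec_upSampling (data : List Int) (factor : Int) (out : List Int) : Prop := out = upSampling_alt data factor
instance (data : List Int) (factor : Int) (out : List Int) : Decidable (Spec_upSampling data factor out) := by unfold Spec_upSampling; infer_instance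

-- ===== CLAIM (what is proved, stated in full; the proofs are below) =====
def Claim_equal_upSampling : Prop := ∀ (data : List Int) (factor : Int), Dom_upSampling data factor → Spec_upSampling data factor (upSampling data factor)

-- ===== LEMMAS AND PROOFS =====

/-- One output block per non-final sample: the sample followed by `z` zeros. -/
def zblock (z : Nat) (x : Int) : List Int := x :: List.replicate z 0

/-- Canonical closed form of the upsampled list (nonempty input intended). -/
def upCF (z : Nat) (d : List Int) : List Int :=
  (d.take (d.length - 1)).flatMap (zblock z) ++ [d.getD (d.length - 1) 0]

theorem zeros_foldl (l : List Int) (acc : List Int) :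
    l.foldl (fun r _ => r ++ [(0 : Int)]) acc = acc ++ List.replicate l.length 0 := by
  induction l generalizing acc with
  | nil => simp
  | cons a t ih => simp [List.foldl, ih, List.replicate_succ]

theorem upCF_cons (z : Nat) (x y : Int) (xs : List Int) :
    upCF z (x :: y :: xs) = x :: (List.replicate z 0 ++ upCF z (y :: xs)) := by
  simp only [upCF, List.length_cons, Nat.add_sub_cancel]
  rw [List.take_succ_cons, List.flatMap_cons]
  simp [zblock]
  rfl

theorem upCF_zero (d : List Int) (hd : d ≠ []) : upCF 0 d = d := by
  induction d with
  | nil => simp at hd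
  | cons x xs ih =>
    cases xs with
    | nil => simp [upCF]
    | cons y ys => rw [upCF_cons]; simp [ih (by simp)]

-- A's loop over the first m indices (all strictly before the last index).
theorem A_prefix (data : List Int) (z : Nat) (m : Nat) (hm : m < data.length) :
    ∀ acc : List Int,
      (PySem.List.pyRange 0 (m : Int) 1).foldl
        (fun result i =>
          let result := result ++ [PySem.List.pyGetD data i 0]
          if i ≠ (data.length : Int) - 1 then
            result ++ List.replicate z 0
          else result)
        acc
      = acc ++ (data.take m).flatMap (zblock z) := by
  induction m with
  | zero => intro acc; simp
  | succ n ih =>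
    intro acc
    have hsplit : PySem.List.pyRange 0 ((n : Int) + 1) 1
        = PySem.List.pyRange 0 (n : Int) 1 ++ [(n : Int)] :=
      PySem.List.pyRange_one_succ_right (by positivity)
    have hn : n < data.length := Nat.lt_of_succ_lt hm
    push_cast
    rw [hsplit, List.foldl_append, ih hn]
    have hne : (n : Int) ≠ (data.length : Int) - 1 := by omega
    simp only [List.foldl_cons, List.foldl_nil, if_pos hne]
    have htake : data.take (n + 1) = data.take n ++ [data[n]] := by
      rw [List.take_add_one]; simp [List.getElem?_eq_getElem hn]
    rw [htake, List.flatMap_append]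
    simp [PySem.List.pyGetD_natCast, List.getD_eq_getElem?_getD,
      List.getElem?_eq_getElem hn, zblock]

theorem A_eq_upCF (data : List Int) (factor : Int) (hd : data ≠ []) :
    upSampling data factor = upCF (factor - 1).toNat data := by
  have hlen : 0 < data.length := List.length_pos_iff.mpr hd
  have hcast : ((data.length : Int) - 1) = ((data.length - 1 : Nat) : Int) := by omega
  have hsplit : PySem.List.pyRange 0 (data.length : Int) 1
      = PySem.List.pyRange 0 ((data.length - 1 : Nat) : Int) 1 ++ [(data.length : Int) - 1] := by
    rw [← hcast]
    have h1 := PySem.List.pyRange_one_succ_right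
      (a := 0) (b := (data.length : Int) - 1) (by omega)
    have h2 : (data.length : Int) - 1 + 1 = (data.length : Int) := by omega
    rw [h2] at h1
    exact h1
  unfold upSampling
  simp only [zeros_foldl, PySem.List.length_pyRange_one, Int.sub_zero]
  rw [hsplit, List.foldl_append,
    A_prefix data (factor - 1).toNat (data.length - 1) (by omega)]
  simp only [List.foldl_cons, List.foldl_nil]
  rw [if_neg (by simp)]
  rw [hcast, PySem.List.pyGetD_natCast]
  simp [upCF]

-- B's write loop, generalized over the start index and an already-finished prefix.
theorem set_at_len (a rest : List Int) (x h : Int) :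
    (a ++ h :: rest).set a.length x = a ++ x :: rest := by
  simp

theorem mul_toNat (s : Nat) (factor : Int) (h0 : 0 ≤ factor) :
    ((s : Int) * factor).toNat = s * factor.toNat := by
  lift factor to ℕ using h0 with fn
  rw [← Nat.cast_mul, Int.toNat_natCast, Int.toNat_natCast]

-- B's write loop, generalized over the start index and an already-finished prefix.
theorem B_loop (factor : Int) (hf : 1 ≤ factor) :
    ∀ (d : List Int), d ≠ [] → ∀ (s : Nat) (a : List Int),
      a.length = s * factor.toNat →
      (PySem.List.enumerate d (s : Int)).foldl
          (fun r p => PySem.List.pySetD r (p.1 * factor) p.2)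
          (a ++ List.replicate ((d.length - 1) * factor.toNat + 1) 0)
        = a ++ upCF (factor.toNat - 1) d := by
  intro d
  induction d with
  | nil => intro h; exact absurd rfl h
  | cons x xs ih =>
    intro _ s a ha
    cases xs with
    | nil =>
      rw [PySem.List.enumerate_cons, PySem.List.enumerate_nil]
      simp only [List.foldl_cons, List.foldl_nil, List.length_cons, List.length_nil]
      rw [PySem.List.pySetD_of_nonneg _ _ (by positivity)]
      rw [mul_toNat s factor (by omega), ← ha]
      simp [upCF]
    | cons y ys =>
      rw [PySem.List.enumerate_cons]
      simp only [List.foldl_cons]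
      have hlen1 : ((x :: y :: ys).length - 1) * factor.toNat + 1
          = factor.toNat + (((y :: ys).length - 1) * factor.toNat + 1) := by
        simp only [List.length_cons, Nat.add_sub_cancel]
        ring
      rw [hlen1, List.replicate_add]
      have hfpos : factor.toNat = 1 + (factor.toNat - 1) := by omega
      have hrep : List.replicate factor.toNat (0 : Int)
          = (0 : Int) :: List.replicate (factor.toNat - 1) 0 := by
        rw [hfpos, List.replicate_add, List.replicate_one]
        simp
      rw [hrep]
      rw [PySem.List.pySetD_of_nonneg _ _ (by positivity)]
      rw [mul_toNat s factor (by omega), ← ha, List.cons_append]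
      rw [set_at_len]
      have ha' : (a ++ x :: List.replicate (factor.toNat - 1) 0).length
          = (s + 1) * factor.toNat := by
        have h1 : 1 ≤ factor.toNat := by omega
        simp [ha, Nat.add_mul]
        omega
      have hcast1 : (s : Int) + 1 = ((s + 1 : Nat) : Int) := by push_cast; ring
      rw [show a ++ x :: (List.replicate (factor.toNat - 1) 0
            ++ List.replicate (((y :: ys).length - 1) * factor.toNat + 1) (0 : Int))
          = (a ++ x :: List.replicate (factor.toNat - 1) 0)
            ++ List.replicate (((y :: ys).length - 1) * factor.toNat + 1) (0 : Int) by simp]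
      rw [hcast1, ih (by simp) (s + 1) _ ha']
      rw [upCF_cons]
      simp

theorem upSampling_alt_eq_upCF (data : List Int) (factor : Int) (hd : data ≠ [])
    (hf : 1 ≤ factor) :
    upSampling_alt data factor = upCF (factor.toNat - 1) data := by
  unfold upSampling_alt
  rw [if_neg (by omega), if_neg (by simpa [List.isEmpty_iff] using hd)]
  have := B_loop factor hf data hd 0 [] (by simp)
  simpa using this

-- ===== VERDICT (by name: the statement is the Claim_ definition above) =====
theorem upSampling_spec : Claim_equal_upSampling := by
  intro data factor _
  unfold Spec_upSampling
  by_cases hd : data = []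
  · subst hd
    simp [upSampling, upSampling_alt]
  · by_cases hf : factor ≤ 0
    · rw [A_eq_upCF data factor hd]
      have hz : (factor - 1).toNat = 0 := by omega
      rw [hz, upCF_zero data hd]
      simp [upSampling_alt, if_pos hf]
    · rw [A_eq_upCF data factor hd,
        upSampling_alt_eq_upCF data factor hd (by omega)]
      congr 1
      omega
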